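-- pv_equiv track=rewrite | github.com/joelsleeba/Befunge-93-Interpreter | Befunge-93-interpreter.py | makecodearray
-- ===== SOURCE A (Python) =====
-- def makecodearray(code):
--     codearray = code.split('\n')
--     for i in codearray:
--         x = []
--         for j in range(len(i)):
--             x.append(i[j])
--         codearray[codearray.index(i)] = x
--     return codearray
-- ===== SOURCE B (Python) =====
-- def makecodearray(code):
--     result = []
--     row = []
--     for ch in code:
--         if ch == '\n':
--             result.append(row)
--             row = []
--         else:
--             row.append(ch)
--     result.append(row)
--     return result
-- ===== Notes on version B (the rewrite author's own statement) =====
-- stated objective: simpler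
-- what changed: Replaces split-then-rebuild (with a list.index scan per line) by one linear character scan that accumulates the current row and appends it at each newline.
import Mathlib
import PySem

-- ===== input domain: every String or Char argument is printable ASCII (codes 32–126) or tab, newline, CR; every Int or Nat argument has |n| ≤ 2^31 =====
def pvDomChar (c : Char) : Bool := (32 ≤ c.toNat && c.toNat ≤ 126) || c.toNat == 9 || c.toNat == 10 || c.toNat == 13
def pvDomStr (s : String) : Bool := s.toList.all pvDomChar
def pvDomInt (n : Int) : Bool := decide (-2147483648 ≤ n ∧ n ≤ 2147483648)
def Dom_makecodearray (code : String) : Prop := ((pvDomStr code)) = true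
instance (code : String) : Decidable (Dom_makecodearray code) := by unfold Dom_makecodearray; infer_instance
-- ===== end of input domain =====

-- B replaces split-then-rebuild (with a repeated list.index scan per line) by one linear character scan.

-- ===== PORT A =====
-- A Python `codearray` element is a str before its loop iteration and a list of
-- 1-char strings after it; the mixed list is modelled by `String ⊕ List String`.

-- inner loop `x = []; for j in range(len(i)): x.append(i[j])` when i is a str
-- (Python i[j] is the 1-character string, hence String.singleton)
def pvInnerS (s : String) : List String :=
  (List.range (PySem.Str.len s).toNat).foldl
    (fun x (j : Nat) =>
      match PySem.Str.pyGet? s (j : Int) with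
      | some c => x ++ [String.singleton c]
      | none => x)        -- unreachable: j < len(s), IndexError impossible
    []

-- the same inner loop when i is already a list (unreachable in fact, kept for faithfulness)
def pvInnerL (l : List String) : List String :=
  (List.range l.length).foldl
    (fun x (j : Nat) =>
      match l[j]? with
      | some e => x ++ [e]
      | none => x)
    []

-- Python `==` between the loop variable and a list element: str == list is always False
def pvPred (cell : String ⊕ List String) (c : String ⊕ List String) : Bool :=
  match c, cell with
  | .inl t, .inl s => t == s
  | .inr a, .inr b => a == b
  | _, _ => false

-- one iteration of `for i in codearray` (CPython iterates the mutated list by index k)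
def pvStep (st : List (String ⊕ List String)) (k : Nat) : List (String ⊕ List String) :=
  match st[k]? with
  | some cell =>
      let x : List String :=
        match cell with
        | .inl s => pvInnerS s
        | .inr l => pvInnerL l
      st.set (st.findIdx (pvPred cell)) (.inr x)  -- codearray[codearray.index(i)] = x
  | none => st        -- unreachable: k < len(codearray)

def makecodearray (code : String) : List (List String) :=
  -- codearray = code.split('\n'); the separator "\n" is non-empty, so split? is never none
  let codearray : List (String ⊕ List String) :=
    ((PySem.Str.split? code "\n").getD []).map Sum.inl
  let final := (List.range codearray.length).foldl pvStep codearray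
  -- by the end of the loop every element is .inr; the .inl branch is unreachable
  -- (Python would return a str element there, outside the declared return type)
  final.map (Sum.elim (fun _ => []) id)

-- ===== PORT B =====
def makecodearray_alt (code : String) : List (List String) :=
  let st := code.toList.foldl
    (fun (st : List (List String) × List String) ch =>
      if ch = '\n' then (st.1 ++ [st.2], ([] : List String))
      else (st.1, st.2 ++ [String.singleton ch]))
    ([], [])
  st.1 ++ [st.2]

-- ===== PRECONDITION & SPEC =====
def Spec_makecodearray (code : String) (out : List (List String)) : Prop := out = makecodearray_alt code
instance (code : String) (out : List (List String)) : Decidable (Spec_makecodearray code out) := by unfold Spec_makecodearray; infer_instance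

-- ===== CLAIM (what is proved, stated in full; the proofs are below) =====
def Claim_equal_makecodearray : Prop := ∀ (code : String), Dom_makecodearray code → Spec_makecodearray code (makecodearray code)

-- ===== LEMMAS AND PROOFS =====

-- reference split-on-'\n' (empty string → one empty piece, trailing '\n' → trailing empty piece)
def pvSplitNL : List Char → List (List Char)
  | [] => [[]]
  | c :: r => if c = '\n' then [] :: pvSplitNL r else (pvSplitNL r).modifyHead (c :: ·)

def pvConv (row : List Char) : List String := row.map String.singleton

lemma pvSplitNL_ne_nil (l : List Char) : pvSplitNL l ≠ [] := by
  induction l with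
  | nil => simp [pvSplitNL]
  | cons c r ih =>
    simp only [pvSplitNL]
    split_ifs
    · simp
    · cases h : pvSplitNL r with
      | nil => exact absurd h ih
      | cons a t => simp [List.modifyHead]

lemma pvGo (fuel : Nat) : ∀ (l cur : List Char) (acc : List (List Char)),
    l.length ≤ fuel →
    PySem.Chars.splitOn.go ['\n'] fuel l cur acc
      = acc.reverse ++ (pvSplitNL l).modifyHead (cur.reverse ++ ·) := by
  induction fuel with
  | zero =>
    intro l cur acc h
    have hl : l = [] := by cases l with
      | nil => rfl
      | cons a t => simp at h
    subst hl
    simp [PySem.Chars.splitOn.go, pvSplitNL, List.modifyHead]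
  | succ f ih =>
    intro l cur acc h
    cases l with
    | nil => simp [PySem.Chars.splitOn.go, pvSplitNL, List.modifyHead]
    | cons c rest =>
      rw [PySem.Chars.splitOn.go]
      by_cases hc : c = '\n'
      · subst hc
        have hpre : List.isPrefixOf ['\n'] ('\n' :: rest) = true := by
          simp [List.isPrefixOf]
        rw [if_pos hpre]
        rw [ih _ _ _ (by simpa using Nat.le_of_succ_le_succ h)]
        simp only [pvSplitNL, List.modifyHead]
        cases hsp : pvSplitNL rest with
        | nil => exact absurd hsp (pvSplitNL_ne_nil rest)
        | cons a t => simp [hsp]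
      · have hpre : List.isPrefixOf ['\n'] (c :: rest) = false := by
          simp [List.isPrefixOf]
          exact fun hcc => absurd hcc.symm hc
        rw [if_neg (by simp [hpre])]
        rw [ih _ _ _ (by simpa using Nat.le_of_succ_le_succ h)]
        simp only [pvSplitNL, if_neg hc]
        cases hsp : pvSplitNL rest with
        | nil => exact absurd hsp (pvSplitNL_ne_nil rest)
        | cons a t => simp [List.modifyHead]

lemma pvSplitOn_eq (l : List Char) :
    PySem.Chars.splitOn l ['\n'] = pvSplitNL l := by
  unfold PySem.Chars.splitOn
  rw [pvGo _ _ _ _ (by omega)]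
  cases h : pvSplitNL l with
  | nil => exact absurd h (pvSplitNL_ne_nil l)
  | cons a t => simp [List.modifyHead]

lemma pvSplit?_eq (code : String) :
    (PySem.Str.split? code "\n").getD []
      = (pvSplitNL code.toList).map String.ofList := by
  simp [PySem.Str.split?, PySem.Chars.split?, pvSplitOn_eq]

-- the inner loop over a string builds its list of 1-character strings
lemma pvInnerS_aux (s : String) : ∀ (n : Nat), n ≤ s.toList.length → ∀ (acc : List String),
    (List.range n).foldl
      (fun x (j : Nat) =>
        match PySem.Str.pyGet? s (j : Int) with
        | some c => x ++ [String.singleton c]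
        | none => x) acc
      = acc ++ (s.toList.take n).map String.singleton := by
  intro n
  induction n with
  | zero => intro _ acc; simp
  | succ m ih =>
    intro h acc
    rw [List.range_succ, List.foldl_append, ih (by omega)]
    have hm : m < s.toList.length := by omega
    have hg : PySem.Str.pyGet? s (m : Int) = some s.toList[m] := by
      simp [List.getElem?_eq_getElem hm]
    simp only [List.foldl_cons, List.foldl_nil, hg]
    simp [List.append_assoc]
    rw [List.take_add_one]
    simp [List.getElem?_eq_getElem hm]

lemma pvInnerS_eq (s : String) : pvInnerS s = pvConv s.toList := by
  unfold pvInnerS pvConv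
  have hlen : (PySem.Str.len s).toNat = s.toList.length := by
    simp [PySem.Str.len]
  rw [hlen]
  have := pvInnerS_aux s s.toList.length (le_refl _) []
  simp only [List.take_length] at this
  simpa using this

-- findIdx over a prefix on which the predicate is false
lemma pvFindIdx_append (p : (String ⊕ List String) → Bool) :
    ∀ (done l : List (String ⊕ List String)), (∀ d ∈ done, p d = false) →
    (done ++ l).findIdx p = done.length + l.findIdx p := by
  intro done
  induction done with
  | nil => intro l _; simp
  | cons d t ih =>
    intro l h
    have hd : p d = false := h d (by simp)
    simp [List.findIdx_cons, hd, ih l (fun x hx => h x (by simp [hx]))]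
    omega

-- set at the length of the prefix
lemma pvSet_append {α : Type} (a : List α) (b : α) (t : List α) (v : α) :
    (a ++ b :: t).set a.length v = a ++ v :: t := by
  induction a with
  | nil => simp
  | cons x xs ih => simp [ih]

-- the main loop invariant: each visited position k holds its original line,
-- index(i) finds exactly k, and the line is replaced by its character list
lemma pvLoop : ∀ (suf : List (List Char)) (done : List (List String)),
    (List.range' done.length suf.length).foldl pvStep
        (done.map Sum.inr ++ suf.map (fun r => Sum.inl (String.ofList r)))
      = done.map Sum.inr ++ suf.map (fun r => Sum.inr (pvConv r)) := by
  intro suf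
  induction suf with
  | nil => intro done; simp
  | cons r rs ih =>
    intro done
    rw [show (r :: rs).length = rs.length + 1 from rfl, List.range'_succ, List.foldl_cons]
    have hstep : pvStep (done.map Sum.inr ++ (r :: rs).map (fun r => Sum.inl (String.ofList r))) done.length
        = (done ++ [pvConv r]).map Sum.inr ++ rs.map (fun r => Sum.inl (String.ofList r)) := by
      unfold pvStep
      have hget : (done.map Sum.inr ++ (r :: rs).map (fun r => Sum.inl (String.ofList r)))[done.length]?
          = some (Sum.inl (String.ofList r)) := by
        rw [List.getElem?_append_right (by simp)]
        simp
      rw [hget]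
      dsimp only
      have hfind : (done.map Sum.inr ++ (r :: rs).map (fun r => Sum.inl (String.ofList r))).findIdx
            (pvPred (Sum.inl (String.ofList r))) = done.length := by
        rw [pvFindIdx_append _ _ _ (by intro d hd; simp at hd; obtain ⟨x, _, hx⟩ := hd; subst hx; rfl)]
        simp [List.findIdx_cons, pvPred]
      rw [hfind]
      have hset := pvSet_append (done.map Sum.inr) (Sum.inl (String.ofList r))
        (rs.map (fun r => Sum.inl (String.ofList r))) (Sum.inr (pvInnerS (String.ofList r)))
      simp only [List.length_map] at hset
      simp only [List.map_cons]
      rw [hset]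
      simp [pvInnerS_eq, pvConv]
    rw [hstep]
    have := ih (done ++ [pvConv r])
    simp only [List.length_append, List.length_cons, List.length_nil] at this
    simpa [List.map_append, List.append_assoc] using this

-- A computes the split rows, each converted to 1-character strings
lemma pvA_eq (code : String) :
    makecodearray code = (pvSplitNL code.toList).map pvConv := by
  have h1 : makecodearray code
      = (List.foldl pvStep (((PySem.Str.split? code "\n").getD []).map Sum.inl)
          (List.range ((((PySem.Str.split? code "\n").getD []).map (Sum.inl : String → String ⊕ List String)).length))).map
          (Sum.elim (fun _ => ([] : List String)) id) := rfl
  rw [h1, pvSplit?_eq, List.map_map]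
  have hcomp : ((Sum.inl : String → String ⊕ List String) ∘ String.ofList)
      = fun r => Sum.inl (String.ofList r) := rfl
  rw [hcomp, List.length_map, List.range_eq_range']
  have hloop := pvLoop (pvSplitNL code.toList) []
  simp only [List.map_nil, List.nil_append, List.length_nil] at hloop
  rw [hloop, List.map_map]
  rfl

-- B's single scan, as a function of the accumulated state
lemma pvB_aux : ∀ (l : List Char) (rows : List (List String)) (cur : List String),
    (let st := l.foldl
        (fun (st : List (List String) × List String) ch =>
          if ch = '\n' then (st.1 ++ [st.2], ([] : List String))
          else (st.1, st.2 ++ [String.singleton ch])) (rows, cur)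
     st.1 ++ [st.2])
      = rows ++ ((pvSplitNL l).map pvConv).modifyHead (cur ++ ·) := by
  intro l
  induction l with
  | nil => intro rows cur; simp [pvSplitNL, List.modifyHead, pvConv]
  | cons c r ih =>
    intro rows cur
    by_cases hc : c = '\n'
    · subst hc
      simp only [List.foldl_cons, reduceIte]
      rw [ih]
      cases hsp : pvSplitNL r with
      | nil => exact absurd hsp (pvSplitNL_ne_nil r)
      | cons a t => simp [pvSplitNL, hsp, List.modifyHead, pvConv]
    · simp only [List.foldl_cons, if_neg hc]
      rw [ih]
      cases hsp : pvSplitNL r with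
      | nil => exact absurd hsp (pvSplitNL_ne_nil r)
      | cons a t =>
        simp [pvSplitNL, hc, hsp, List.modifyHead, pvConv]

lemma pvB_eq (code : String) :
    makecodearray_alt code = (pvSplitNL code.toList).map pvConv := by
  unfold makecodearray_alt
  have := pvB_aux code.toList [] []
  simp only [List.nil_append] at this
  rw [this]
  cases hsp : pvSplitNL code.toList with
  | nil => exact absurd hsp (pvSplitNL_ne_nil _)
  | cons a t => simp [List.modifyHead]

-- ===== VERDICT (by name: the statement is the Claim_ definition above) =====
theorem makecodearray_spec : Claim_equal_makecodearray := by
  intro code _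
  unfold Spec_makecodearray
  rw [pvA_eq, pvB_eq]
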